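-- pv_equiv track=rewrite | github.com/itlvd/Data-Mining-Lab01 | 5_delete_col.py | delete_col_index
-- ===== SOURCE A (Python) =====
-- def delete_col_index(df, index):
--     #matran = zip(*df)
--     matran = [[df[j][i] for j in range(len(df))] for i in range(len(df[0]))]
--     count = 0
--     for i in index:
--         matran.pop(i - count)
--         count += 1
--
--     l = [[matran[j][i] for j in range(len(matran))] for i in range(len(matran[0]))]
--     return l
-- ===== SOURCE B (Python) =====
-- def delete_col_index(df, index):
--     # simpler: pop column INDICES (same i-count semantics), then select columns in one pass
--     cols = list(range(len(df[0])))
--     count = 0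
--     for i in index:
--         cols.pop(i - count)
--         count += 1
--     return [[df[j][c] for c in cols] for j in range(len(df))]
-- ===== Notes on version B (the rewrite author's own statement) =====
-- stated objective: simpler
-- what changed: B drops both transposes: it runs the same pop loop on the list of column indices instead of on transposed rows, then selects the kept columns from df in one direct comprehension.
-- outside the precondition, e.g. on delete_col_index([[1, 2], [3, 4]], [0, 0]): A raises IndexError, B returns [[], []]; on delete_col_index([[1, 2], [3]], [1]): A raises IndexError, B returns [[1], [3]]
import Mathlib
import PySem

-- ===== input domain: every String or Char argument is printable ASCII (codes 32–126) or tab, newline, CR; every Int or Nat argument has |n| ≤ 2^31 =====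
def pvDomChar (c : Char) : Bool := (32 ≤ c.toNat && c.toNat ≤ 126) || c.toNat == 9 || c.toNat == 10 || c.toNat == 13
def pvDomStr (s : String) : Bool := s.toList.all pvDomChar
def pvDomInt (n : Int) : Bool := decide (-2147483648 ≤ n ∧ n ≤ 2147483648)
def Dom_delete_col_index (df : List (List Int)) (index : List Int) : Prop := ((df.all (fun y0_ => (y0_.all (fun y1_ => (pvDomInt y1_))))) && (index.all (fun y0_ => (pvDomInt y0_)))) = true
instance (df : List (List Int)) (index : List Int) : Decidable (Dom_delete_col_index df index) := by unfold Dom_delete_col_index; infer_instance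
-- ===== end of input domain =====

-- B replaces A's transpose / pop-rows / transpose-back with one pop loop over column INDICES
-- followed by a single direct selection pass (simpler decomposition; return value only, no mutation).

-- ===== PORT A =====
-- the shared Python loop shape `for i in index: xs.pop(i - count); count += 1`
-- (a failing pop means Python raises IndexError — excluded by Pre_; the port keeps the state unchanged there)
def popLoop {α : Type} (index : List Int) (init : List α) : List α × Int :=
  index.foldl (fun st i =>
    match PySem.List.pop? st.1 (i - st.2) with
    | some p => (p.2, st.2 + 1)
    | none => (st.1, st.2 + 1)) (init, 0)

def delete_col_index (df : List (List Int)) (index : List Int) : List (List Int) :=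
  let matran := (PySem.List.pyRange 0 ((PySem.List.pyGetD df 0 []).length : Int) 1).map
    (fun i => (PySem.List.pyRange 0 (df.length : Int) 1).map
      (fun j => PySem.List.pyGetD (PySem.List.pyGetD df j []) i 0))
  let matran := (popLoop index matran).1
  (PySem.List.pyRange 0 ((PySem.List.pyGetD matran 0 []).length : Int) 1).map
    (fun i => (PySem.List.pyRange 0 (matran.length : Int) 1).map
      (fun j => PySem.List.pyGetD (PySem.List.pyGetD matran j []) i 0))

-- ===== PORT B =====
def delete_col_index_alt (df : List (List Int)) (index : List Int) : List (List Int) :=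
  let cols := PySem.List.pyRange 0 ((PySem.List.pyGetD df 0 []).length : Int) 1
  let cols := (popLoop index cols).1
  (PySem.List.pyRange 0 (df.length : Int) 1).map
    (fun j => cols.map (fun c => PySem.List.pyGetD (PySem.List.pyGetD df j []) c 0))

-- ===== PRECONDITION & SPEC =====
-- Pre_ excludes exactly the inputs on which the Python A raises: empty df (df[0] → IndexError),
-- a row shorter than row 0 (IndexError while transposing), an out-of-range pop (IndexError;
-- pop validity depends only on the current length (df[0]'s length minus the step number), so it
-- is a closed-form condition on index), and deleting all the columns (then `matran[0]` raises).
def Pre_delete_col_index (df : List (List Int)) (index : List Int) : Prop :=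
  df ≠ [] ∧
  (∀ row ∈ df, (df.headD []).length ≤ row.length) ∧
  (∀ k ∈ List.range index.length,
    -(((df.headD []).length : Int) - k) ≤ index.getD k 0 - k ∧
    index.getD k 0 - k < ((df.headD []).length : Int) - k) ∧
  index.length < (df.headD []).length
instance (df : List (List Int)) (index : List Int) : Decidable (Pre_delete_col_index df index) := by
  unfold Pre_delete_col_index; infer_instance

def pvWitness_delete_col_index : List (List Int) × List Int := ([[1, 2, 3], [4, 5, 6]], [1])

def Spec_delete_col_index (df : List (List Int)) (index : List Int) (out : List (List Int)) : Prop := out = delete_col_index_alt df index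
instance (df : List (List Int)) (index : List Int) (out : List (List Int)) : Decidable (Spec_delete_col_index df index out) := by unfold Spec_delete_col_index; infer_instance

-- ===== CLAIM (what is proved, stated in full; the proofs are below) =====
def Claim_equal_delete_col_index : Prop := ∀ (df : List (List Int)) (index : List Int), Dom_delete_col_index df index → Pre_delete_col_index df index → Spec_delete_col_index df index (delete_col_index df index)

-- ===== LEMMAS AND PROOFS =====

-- pop? commutes with map (pop only inspects the length and positions)
theorem pop?_map {α β : Type} (f : α → β) (l : List α) (i : Int) :
    PySem.List.pop? (l.map f) i = (PySem.List.pop? l i).map (fun p => (f p.1, p.2.map f)) := by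
  simp only [PySem.List.pop?, List.length_map]
  cases PySem.List.pyIdx? l.length i with
  | none => rfl
  | some k =>
    simp
    cases l[k]? with
    | none => rfl
    | some x => simp [List.eraseIdx_map]

-- hence the whole pop loop commutes with map
theorem popLoop_map_aux {α β : Type} (f : α → β) :
    ∀ (index : List Int) (l : List α) (c : Int),
    (index.foldl (fun st i => match PySem.List.pop? st.1 (i - st.2) with
       | some p => (p.2, st.2 + 1)
       | none => (st.1, st.2 + 1)) ((l.map f : List β), c))
    = ((index.foldl (fun st i => match PySem.List.pop? st.1 (i - st.2) with
       | some p => (p.2, st.2 + 1)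
       | none => (st.1, st.2 + 1)) (l, c)).1.map f,
       (index.foldl (fun st i => match PySem.List.pop? st.1 (i - st.2) with
       | some p => (p.2, st.2 + 1)
       | none => (st.1, st.2 + 1)) (l, c)).2)
  | [], l, c => by simp
  | (i :: rest), l, c => by
      simp only [List.foldl_cons]
      rw [pop?_map]
      cases h : PySem.List.pop? l (i - c) with
      | none => simpa [h] using popLoop_map_aux f rest l (c + 1)
      | some p => simpa [h] using popLoop_map_aux f rest p.2 (c + 1)

theorem popLoop_map {α β : Type} (f : α → β) (index : List Int) (l : List α) :
    popLoop index (l.map f) = ((popLoop index l).1.map f, (popLoop index l).2) := by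
  unfold popLoop
  exact popLoop_map_aux f index l 0

-- the pop loop removes at most one element per step
theorem popLoop_length_aux {α : Type} :
    ∀ (index : List Int) (l : List α) (c : Int),
    l.length ≤ (index.foldl (fun st i => match PySem.List.pop? st.1 (i - st.2) with
       | some p => (p.2, st.2 + 1)
       | none => (st.1, st.2 + 1)) (l, c)).1.length + index.length
  | [], l, c => by simp
  | (i :: rest), l, c => by
      simp only [List.foldl_cons]
      cases h : PySem.List.pop? l (i - c) with
      | none =>
        have := popLoop_length_aux rest l (c + 1)
        simp only [List.length_cons]
        omega
      | some p =>
        have h1 := PySem.List.length_of_pop?_eq_some l h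
        have h2 := popLoop_length_aux rest p.2 (c + 1)
        simp only [List.length_cons]
        omega

theorem popLoop_length_ge {α : Type} (index : List Int) (l : List α) :
    l.length ≤ (popLoop index l).1.length + index.length := by
  unfold popLoop
  exact popLoop_length_aux index l 0

theorem delete_col_index_spec : Claim_equal_delete_col_index := by
  intro df index _ hPre
  obtain ⟨hne, _, _, hlen⟩ := hPre
  unfold Spec_delete_col_index delete_col_index delete_col_index_alt
  dsimp only
  set g : Int → List Int := fun c => (PySem.List.pyRange 0 (df.length : Int) 1).map
      (fun j => PySem.List.pyGetD (PySem.List.pyGetD df j []) c 0) with hg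
  set cols : List Int := PySem.List.pyRange 0 ((PySem.List.pyGetD df 0 []).length : Int) 1 with hcols
  have hmat : (PySem.List.pyRange 0 ((PySem.List.pyGetD df 0 []).length : Int) 1).map
      (fun i => (PySem.List.pyRange 0 (df.length : Int) 1).map
        (fun j => PySem.List.pyGetD (PySem.List.pyGetD df j []) i 0))
      = cols.map g := rfl
  rw [hmat, popLoop_map]
  set cf := (popLoop index cols).1 with hcf
  -- cf is nonempty
  have hn0eq : (PySem.List.pyGetD df 0 []).length = (df.headD []).length := by
    rw [PySem.List.pyGetD_zero]
    cases df with
    | nil => rfl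
    | cons r rs => rfl
  have hclen : cols.length = (df.headD []).length := by
    rw [hcols, PySem.List.length_pyRange_one, hn0eq]
    omega
  have hcfne : cf ≠ [] := by
    have h := popLoop_length_ge index cols
    rw [← hcf, hclen] at h
    intro hnil
    rw [hnil] at h
    simp only [List.length_nil, Nat.zero_add] at h
    omega
  obtain ⟨c0, cs, hcf0⟩ := List.exists_cons_of_ne_nil hcfne
  -- row 0 of the popped transpose is g c0, of length df.length
  have hhead : (PySem.List.pyGetD (cf.map g) 0 []).length = df.length := by
    rw [PySem.List.pyGetD_zero, hcf0]
    simp [hg, PySem.List.length_pyRange_one]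
  rw [hhead]
  apply List.map_congr_left
  intro i hi
  rw [PySem.List.mem_pyRange_one] at hi
  -- rewrite the inner transpose row as a direct selection over cf
  have hlenmap : ((cf.map g).length : Int) = (cf.length : Int) := by simp
  rw [hlenmap]
  apply List.ext_getElem
  · simp [PySem.List.length_pyRange_one]
  · intro j hj1 hj2
    simp only [List.length_map] at hj2
    simp only [List.getElem_map, PySem.List.getElem_pyRange_one, zero_add]
    rw [PySem.List.pyGetD_natCast]
    have h1 : (cf.map g).getD j [] = g cf[j] := by
      simp [List.getD_eq_getElem?_getD, hj2]
    rw [h1, hg]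
    exact PySem.List.pyGetD_map_pyRange_of_nonneg _ _ _ _ hi.1 hi.2
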